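-- pv_equiv track=rewrite | github.com/yuyeon329/Programmers-codingtest | level2/더 맵게/solution.py | solution
-- ===== SOURCE A (Python) =====
-- import heapq
--
-- def solution(scoville, K):
--     heapq.heapify(scoville)
--     answer = 0
--
--     while len(scoville)>1:
--         if scoville[0] < K :
--             tmp1 = heapq.heappop(scoville)
--             tmp2 = heapq.heappop(scoville)
--             heapq.heappush(scoville, tmp1+tmp2*2)
--             answer += 1
--         else :
--             break
--     if scoville[0] < K:
--         answer = 0
--     return -1 if answer == 0 else answer
-- ===== SOURCE B (Python) =====
-- def solution(scoville, K):
--     # Plain-list re-implementation: repeated linear min scans instead of a heap.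
--     # (A heapifies the caller's list in place; B leaves the argument untouched.)
--     s = list(scoville)
--     answer = 0
--     while len(s) > 1:
--         t1 = min(s)
--         if t1 >= K:
--             break
--         s.remove(t1)
--         t2 = min(s)
--         s.remove(t2)
--         s.append(t1 + t2 * 2)
--         answer += 1
--     if answer != 0 and min(s) >= K:
--         return answer
--     return -1
-- ===== Notes on version B (the rewrite author's own statement) =====
-- stated objective: alternative
-- what changed: Replaced the heapq binary-heap priority queue with a plain list processed by repeated linear min-scans (min + remove + append per merge); B also does not mutate the caller's list, while A heapifies it in place.
import Mathlib
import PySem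

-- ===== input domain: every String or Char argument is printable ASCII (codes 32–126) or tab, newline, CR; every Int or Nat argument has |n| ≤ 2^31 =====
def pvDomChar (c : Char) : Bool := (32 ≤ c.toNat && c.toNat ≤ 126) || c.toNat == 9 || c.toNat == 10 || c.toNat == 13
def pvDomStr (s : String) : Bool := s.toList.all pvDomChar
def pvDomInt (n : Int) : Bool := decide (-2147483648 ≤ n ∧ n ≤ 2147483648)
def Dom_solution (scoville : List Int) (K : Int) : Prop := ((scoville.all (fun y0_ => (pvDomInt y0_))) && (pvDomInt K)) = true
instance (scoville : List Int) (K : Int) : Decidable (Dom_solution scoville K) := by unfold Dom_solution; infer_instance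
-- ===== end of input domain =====

-- B replaces A's heapq priority queue by repeated linear min-scans on a plain list (no speed claim);
-- the equivalence is about the RETURN value: A heapifies the caller's list in place, B does not mutate it.

-- ===== PORT A =====
-- A uses the heapq module; CPython's heapify/heappush/heappop (and their helpers
-- _siftdown/_siftup) are ported below step for step.  Python list indexing is total here
-- (default 0 via `hget`): on every reachable state all indices are in range, so this is exact.

def hget (l : List Int) (i : Nat) : Int := l.getD i 0

theorem pv_sd_dec {s p : Nat} (h : s < p) : (p - 1) / 2 < p := by omega

-- CPython heapq._siftdown's while loop (newitem is heap[pos] at entry, kept in a variable;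
-- parentpos = (pos - 1) >> 1 = (pos - 1) / 2)
def siftdownLoop (newitem : Int) (startpos : Nat) (heap : List Int) (pos : Nat) : List Int :=
  if _h : startpos < pos then
    if newitem < hget heap ((pos - 1) / 2) then
      siftdownLoop newitem startpos (heap.set pos (hget heap ((pos - 1) / 2))) ((pos - 1) / 2)
    else heap.set pos newitem
  else heap.set pos newitem
termination_by pos
decreasing_by exact pv_sd_dec _h

-- heapq._siftdown(heap, startpos, pos)
def siftdown (heap : List Int) (startpos pos : Nat) : List Int :=
  siftdownLoop (hget heap pos) startpos heap pos

-- _siftup's childpos after the conditional bump to the smaller child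
def heapChild (endpos : Nat) (heap : List Int) (pos : Nat) : Nat :=
  if 2 * pos + 2 < endpos ∧ ¬ hget heap (2 * pos + 1) < hget heap (2 * pos + 2) then
    2 * pos + 2
  else 2 * pos + 1

theorem heapChild_gt (e : Nat) (h : List Int) (p : Nat) : p < heapChild e h p := by
  unfold heapChild; split <;> omega

theorem heapChild_lt (e : Nat) (h : List Int) (p : Nat) (hp : 2 * p + 1 < e) :
    heapChild e h p < e := by
  unfold heapChild; split <;> omega

theorem pv_su_dec (e : Nat) (h : List Int) (p : Nat) (hp : 2 * p + 1 < e) :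
    e - heapChild e h p < e - p := by
  have h1 := heapChild_gt e h p
  have h2 := heapChild_lt e h p hp
  omega

-- heapq._siftup's while loop: returns the heap and the final pos
def siftupLoop (endpos : Nat) (heap : List Int) (pos : Nat) : List Int × Nat :=
  if _h : 2 * pos + 1 < endpos then
    siftupLoop endpos (heap.set pos (hget heap (heapChild endpos heap pos))) (heapChild endpos heap pos)
  else (heap, pos)
termination_by endpos - pos
decreasing_by exact pv_su_dec endpos heap pos _h

-- heapq._siftup(heap, pos): run the loop, write newitem at the final pos, then _siftdown
def siftup (heap : List Int) (pos : Nat) : List Int :=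
  siftdown ((siftupLoop heap.length heap pos).1.set (siftupLoop heap.length heap pos).2 (hget heap pos))
    pos (siftupLoop heap.length heap pos).2

-- heapq.heappush(heap, item)
def heappush (heap : List Int) (item : Int) : List Int :=
  siftdown (heap ++ [item]) 0 heap.length

-- heapq.heappop(heap): returns (popped value, remaining heap)
def heappop (heap : List Int) : Int × List Int :=
  if heap.dropLast.isEmpty then (hget heap (heap.length - 1), heap.dropLast)
  else (hget heap.dropLast 0, siftup (heap.dropLast.set 0 (hget heap (heap.length - 1))) 0)

-- heapq.heapify(x): for i in reversed(range(n//2)): _siftup(x, i)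
def heapify (x : List Int) : List Int :=
  ((List.range (x.length / 2)).reverse).foldl (fun h i => siftup h i) x

-- length facts needed for the main loop's termination (cited by decreasing_by)
theorem len_siftdownLoop (newitem : Int) (startpos : Nat) (heap : List Int) (pos : Nat) :
    (siftdownLoop newitem startpos heap pos).length = heap.length := by
  induction pos using Nat.strong_induction_on generalizing heap with
  | _ pos ih =>
    rw [siftdownLoop]
    split
    · split
      · rw [ih _ (by omega)]; simp
      · simp
    · simp

theorem len_siftupLoop (endpos : Nat) (heap : List Int) (pos : Nat) :
    (siftupLoop endpos heap pos).1.length = heap.length := by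
  induction heap, pos using siftupLoop.induct endpos with
  | case1 heap pos h ih => rw [siftupLoop]; simp only [dif_pos h]; rw [ih]; simp
  | case2 heap pos h => rw [siftupLoop]; simp [h]

theorem len_siftup (heap : List Int) (pos : Nat) :
    (siftup heap pos).length = heap.length := by
  unfold siftup siftdown
  rw [len_siftdownLoop]
  simp [len_siftupLoop]

theorem len_heappush (heap : List Int) (item : Int) :
    (heappush heap item).length = heap.length + 1 := by
  unfold heappush siftdown
  rw [len_siftdownLoop]; simp

theorem len_heappop (heap : List Int) :
    (heappop heap).2.length = heap.length - 1 := by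
  unfold heappop
  split
  · simp [List.length_dropLast]
  · simp [len_siftup, List.length_dropLast]

theorem pv_sol_dec (heap : List Int) (v : Int) (h : 1 < heap.length) :
    (heappush (heappop (heappop heap).2).2 v).length < heap.length := by
  rw [len_heappush, len_heappop, len_heappop]; omega

-- the while-loop of A's solution; returns (final heap, answer)
def solLoop (K : Int) (heap : List Int) (answer : Int) : List Int × Int :=
  if _h : 1 < heap.length then
    if hget heap 0 < K then
      solLoop K (heappush (heappop (heappop heap).2).2 ((heappop heap).1 + (heappop (heappop heap).2).1 * 2)) (answer + 1)
    else (heap, answer)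
  else (heap, answer)
termination_by heap.length
decreasing_by exact pv_sol_dec heap _ _h

def solution (scoville : List Int) (K : Int) : Int :=
  if (if hget (solLoop K (heapify scoville) 0).1 0 < K then 0 else (solLoop K (heapify scoville) 0).2) = 0 then -1
  else (if hget (solLoop K (heapify scoville) 0).1 0 < K then 0 else (solLoop K (heapify scoville) 0).2)

-- ===== PORT B =====
theorem pv_alt_dec (s : List Int) (t1 t2 v : Int) (h : 1 < s.length)
    (h1 : PySem.List.min? s (fun x => x) = some t1)
    (h2 : PySem.List.min? ((PySem.List.remove? s t1).getD s) (fun x => x) = some t2) :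
    ((PySem.List.remove? ((PySem.List.remove? s t1).getD s) t2).getD
        ((PySem.List.remove? s t1).getD s) ++ [v]).length < s.length := by
  have m1 := PySem.List.min?_mem h1
  have e1 : PySem.List.remove? s t1 = some (s.erase t1) :=
    PySem.List.remove?_eq_some_erase s t1 m1
  rw [e1, Option.getD_some] at h2 ⊢
  have m2 := PySem.List.min?_mem h2
  have e2 : PySem.List.remove? (s.erase t1) t2 = some ((s.erase t1).erase t2) :=
    PySem.List.remove?_eq_some_erase (s.erase t1) t2 m2
  rw [e2, Option.getD_some]
  have l1 : (s.erase t1).length = s.length - 1 := List.length_erase_of_mem m1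
  have l2 : ((s.erase t1).erase t2).length = (s.erase t1).length - 1 := List.length_erase_of_mem m2
  simp only [List.length_append, List.length_cons, List.length_nil]
  omega

-- the while-loop of B: repeated linear min-scans; returns (final list, answer)
def altLoop (K : Int) (s : List Int) (answer : Int) : List Int × Int :=
  if _h : 1 < s.length then
    match h1 : PySem.List.min? s (fun x => x) with
    | none => (s, answer)          -- unreachable: s ≠ []
    | some t1 =>
      if K ≤ t1 then (s, answer)   -- break
      else
        let s1 := (PySem.List.remove? s t1).getD s
        match h2 : PySem.List.min? s1 (fun x => x) with
        | none => (s1, answer)     -- unreachable: s1 ≠ []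
        | some t2 =>
          altLoop K (((PySem.List.remove? s1 t2).getD s1) ++ [t1 + t2 * 2]) (answer + 1)
  else (s, answer)
termination_by s.length
decreasing_by exact pv_alt_dec s t1 t2 _ _h h1 h2

def solution_alt (scoville : List Int) (K : Int) : Int :=
  if (altLoop K scoville 0).2 ≠ 0 then
    match PySem.List.min? (altLoop K scoville 0).1 (fun x => x) with
    | some m => if K ≤ m then (altLoop K scoville 0).2 else -1
    | none => -1                   -- unreachable when the answer is nonzero
  else -1

-- ===== PRECONDITION & SPEC =====
-- Pre_ excludes only the empty list, on which A raises IndexError (scoville[0]).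
def Pre_solution (scoville : List Int) (K : Int) : Prop := scoville ≠ []
instance (scoville : List Int) (K : Int) : Decidable (Pre_solution scoville K) := by
  unfold Pre_solution; infer_instance

def pvWitness_solution : List Int × Int := ([1, 2, 9, 3], 7)

def Spec_solution (scoville : List Int) (K : Int) (out : Int) : Prop := out = solution_alt scoville K
instance (scoville : List Int) (K : Int) (out : Int) : Decidable (Spec_solution scoville K out) := by
  unfold Spec_solution; infer_instance

-- ===== CLAIM (what is proved, stated in full; the proofs are below) =====
def Claim_equal_solution : Prop := ∀ (scoville : List Int) (K : Int), Dom_solution scoville K → Pre_solution scoville K → Spec_solution scoville K (solution scoville K)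

-- ===== LEMMAS AND PROOFS =====

-- getD/set basics
theorem hget_set_eq (l : List Int) (i : Nat) (h : i < l.length) (a : Int) :
    hget (l.set i a) i = a := by
  simp [hget, List.getD_eq_getElem?_getD, h]

theorem hget_set_ne (l : List Int) (i j : Nat) (h : j ≠ i) (a : Int) :
    hget (l.set i a) j = hget l j := by
  simp [hget, List.getD_eq_getElem?_getD, List.getElem?_set_ne (Ne.symm h)]

theorem set_hget_self (l : List Int) (i : Nat) (h : i < l.length) :
    l.set i (hget l i) = l := by
  simp only [hget, List.getD_eq_getElem?_getD]
  rw [List.getElem?_eq_getElem h]; simp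

theorem hget_mem (l : List Int) (i : Nat) (h : i < l.length) : hget l i ∈ l := by
  rw [hget, List.getD_eq_getElem l 0 h]
  exact List.getElem_mem h

theorem mset_set : ∀ (l : List Int) (i : Nat), i < l.length → ∀ a : Int,
    ((l.set i a : List Int) : Multiset Int) + {hget l i} = (l : Multiset Int) + {a}
  | [], i, h, a => by simp at h
  | x :: t, 0, h, a => by
      simp only [List.set_cons_zero, hget, List.getD_cons_zero, ← Multiset.cons_coe]
      rw [← Multiset.singleton_add, ← Multiset.singleton_add]
      abel
  | x :: t, i + 1, h, a => by
      simp only [List.set_cons_succ, hget, List.getD_cons_succ, ← Multiset.cons_coe]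
      rw [← Multiset.singleton_add, ← Multiset.singleton_add, add_assoc, add_assoc]
      congr 1
      exact mset_set t i (by simpa using h) a

theorem mset_erase (l : List Int) (a : Int) (h : a ∈ l) :
    ((l.erase a : List Int) : Multiset Int) + {a} = (l : Multiset Int) := by
  rw [← Multiset.coe_erase, add_comm, Multiset.singleton_add,
    Multiset.cons_erase (show a ∈ (l : Multiset Int) by simpa using h)]

-- descendant relation in the implicit binary heap: isDesc r j ↔ j is in the subtree rooted at r
def isDesc (r j : Nat) : Bool :=
  if j < r then false
  else if j = r then true
  else isDesc r ((j - 1) / 2)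
termination_by j
decreasing_by omega

theorem isDesc_self (r : Nat) : isDesc r r = true := by rw [isDesc]; simp

theorem isDesc_le : ∀ {r j : Nat}, isDesc r j = true → r ≤ j := by
  intro r j
  induction j using Nat.strong_induction_on with
  | _ j ih =>
    rw [isDesc]
    split
    · simp
    · split
      · omega
      · intro h
        rename_i h1 h2
        have := ih ((j - 1) / 2) (by omega) h
        omega

theorem isDesc_parent (r j : Nat) (h : r < j) : isDesc r j = isDesc r ((j - 1) / 2) := by
  conv_lhs => rw [isDesc]
  simp [Nat.not_lt.mpr (Nat.le_of_lt h), Nat.ne_of_gt h]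

theorem child_parent {p c : Nat} (h : c = 2 * p + 1 ∨ c = 2 * p + 2) : (c - 1) / 2 = p := by
  omega

theorem isDesc_child {r p c : Nat} (hp : isDesc r p = true) (hc : c = 2 * p + 1 ∨ c = 2 * p + 2) :
    isDesc r c = true := by
  have hrp := isDesc_le hp
  rw [isDesc_parent r c (by omega), child_parent hc]
  exact hp

theorem isDesc_zero (j : Nat) : isDesc 0 j = true := by
  induction j using Nat.strong_induction_on with
  | _ j ih =>
    rw [isDesc]
    split
    · omega
    · split
      · rfl
      · exact ih _ (by omega)

theorem isDesc_trans : ∀ {a b c : Nat}, isDesc a b = true → isDesc b c = true → isDesc a c = true := by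
  intro a b c hab
  induction c using Nat.strong_induction_on with
  | _ c ih =>
    intro hbc
    by_cases hc : c = b
    · subst hc; exact hab
    · have hbc' := isDesc_le hbc
      have hb : b < c := by omega
      rw [isDesc_parent b c hb] at hbc
      have hac' := ih ((c - 1) / 2) (by omega) hbc
      have hab' := isDesc_le hab
      rw [isDesc_parent a c (by omega)]
      exact hac'

-- membership in a child's subtree pulled back to the parent's subtree facts
theorem not_isDesc_of_lt {r j : Nat} (h : j < r) : isDesc r j = false := by
  rw [isDesc]; simp [h]

theorem isDesc_parent_of_ne {r j : Nat} (h : isDesc r j = true) (hne : j ≠ r) :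
    isDesc r ((j - 1) / 2) = true := by
  have := isDesc_le h
  rwa [isDesc_parent r j (by omega)] at h

theorem mset_two_sets (heap : List Int) (pos q : Nat) (hq : q ≠ pos)
    (hlen : pos < heap.length) (hqlen : q < heap.length) (x : Int) :
    (((heap.set pos (hget heap q)).set q x : List Int) : Multiset Int)
      = ((heap.set pos x : List Int) : Multiset Int) := by
  have e1 := mset_set (heap.set pos (hget heap q)) q (by rw [List.length_set]; omega) x
  rw [hget_set_ne _ _ _ hq] at e1
  have e2 := mset_set heap pos hlen (hget heap q)
  have e3 := mset_set heap pos hlen x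
  have key : (((heap.set pos (hget heap q)).set q x : List Int) : Multiset Int)
        + {hget heap q} + {hget heap pos}
      = ((heap.set pos x : List Int) : Multiset Int) + {hget heap q} + {hget heap pos} := by
    calc (((heap.set pos (hget heap q)).set q x : List Int) : Multiset Int)
          + {hget heap q} + {hget heap pos}
        = ((heap.set pos (hget heap q) : List Int) : Multiset Int) + {x} + {hget heap pos} := by
          rw [e1]
      _ = ((heap.set pos (hget heap q) : List Int) : Multiset Int) + {hget heap pos} + {x} := by
          rw [add_right_comm]
      _ = ((heap : List Int) : Multiset Int) + {hget heap q} + {x} := by rw [e2]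
      _ = ((heap : List Int) : Multiset Int) + {x} + {hget heap q} := by rw [add_right_comm]
      _ = ((heap.set pos x : List Int) : Multiset Int) + {hget heap pos} + {hget heap q} := by
          rw [e3]
      _ = ((heap.set pos x : List Int) : Multiset Int) + {hget heap q} + {hget heap pos} := by
          rw [add_right_comm]
  exact add_right_cancel (add_right_cancel key)

-- heap-order predicates
def HeapAt (l : List Int) (r : Nat) : Prop :=
  ∀ p c, isDesc r p = true → (c = 2 * p + 1 ∨ c = 2 * p + 2) → c < l.length → hget l p ≤ hget l c

def IsHeap (l : List Int) : Prop :=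
  ∀ p c, (c = 2 * p + 1 ∨ c = 2 * p + 2) → c < l.length → hget l p ≤ hget l c

theorem heapAt_zero_iff (l : List Int) : HeapAt l 0 ↔ IsHeap l := by
  constructor
  · intro h p c hc hlt; exact h p c (isDesc_zero p) hc hlt
  · intro h p c _ hc hlt; exact h p c hc hlt

theorem subRootMin {l : List Int} {r : Nat} (hH : HeapAt l r) :
    ∀ j, isDesc r j = true → j < l.length → hget l r ≤ hget l j := by
  intro j
  induction j using Nat.strong_induction_on with
  | _ j ih =>
    intro hdesc hlen
    by_cases hjr : j = r
    · subst hjr; exact le_refl _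
    · have hrj : r < j := by have := isDesc_le hdesc; omega
      have hpar := isDesc_parent_of_ne hdesc hjr
      have h1 : hget l r ≤ hget l ((j - 1) / 2) := ih ((j - 1) / 2) (by omega) hpar (by omega)
      have h2 : hget l ((j - 1) / 2) ≤ hget l j :=
        hH ((j - 1) / 2) j hpar (by omega) hlen
      exact le_trans h1 h2

theorem rootMin {l : List Int} (hH : IsHeap l) (j : Nat) (hj : j < l.length) :
    hget l 0 ≤ hget l j :=
  subRootMin ((heapAt_zero_iff l).mpr hH) j (isDesc_zero j) hj

theorem rootMin_mem {l : List Int} (hH : IsHeap l) (x : Int) (hx : x ∈ l) : hget l 0 ≤ x := by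
  obtain ⟨j, hj, rfl⟩ := List.mem_iff_getElem.mp hx
  have h := rootMin hH j hj
  have e : hget l j = l[j] := by
    simp [hget, List.getD_eq_getElem?_getD, List.getElem?_eq_getElem hj]
  rwa [e] at h

-- correctness of CPython's _siftdown loop, relative to the subtree rooted at s
theorem siftdownLoop_spec (s : Nat) (newitem : Int) :
    ∀ pos heap, isDesc s pos = true → pos < heap.length →
    (∀ p c, isDesc s p = true → (c = 2 * p + 1 ∨ c = 2 * p + 2) → c < heap.length → c ≠ pos →
        hget (heap.set pos newitem) p ≤ hget (heap.set pos newitem) c) →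
    (s < pos → ∀ c, (c = 2 * pos + 1 ∨ c = 2 * pos + 2) → c < heap.length →
        hget heap ((pos - 1) / 2) ≤ hget heap c) →
    ((siftdownLoop newitem s heap pos).length = heap.length ∧
     (∀ j, isDesc s j = false → hget (siftdownLoop newitem s heap pos) j = hget heap j) ∧
     ((siftdownLoop newitem s heap pos : List Int) : Multiset Int)
        = ((heap.set pos newitem : List Int) : Multiset Int) ∧
     HeapAt (siftdownLoop newitem s heap pos) s) := by
  intro pos
  induction pos using Nat.strong_induction_on with
  | _ pos ih =>
    intro heap hdesc hlen hB hC
    rw [siftdownLoop]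
    by_cases hsp : s < pos
    · simp only [dif_pos hsp]
      by_cases hni : newitem < hget heap ((pos - 1) / 2)
      · simp only [if_pos hni]
        -- recursive case: the hole moves to the parent
        have hppos : (pos - 1) / 2 < pos := by omega
        have hdesc' : isDesc s ((pos - 1) / 2) = true :=
          isDesc_parent_of_ne hdesc (by omega)
        have hplen : (pos - 1) / 2 < (heap.set pos (hget heap ((pos - 1) / 2))).length := by
          rw [List.length_set]; omega
        have hppne : (pos - 1) / 2 ≠ pos := by omega
        -- hB for the new state
        have hB' : ∀ p c, isDesc s p = true → (c = 2 * p + 1 ∨ c = 2 * p + 2) →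
            c < (heap.set pos (hget heap ((pos - 1) / 2))).length → c ≠ (pos - 1) / 2 →
            hget ((heap.set pos (hget heap ((pos - 1) / 2))).set ((pos - 1) / 2) newitem) p ≤
            hget ((heap.set pos (hget heap ((pos - 1) / 2))).set ((pos - 1) / 2) newitem) c := by
          intro p c hdp hcp hclen hcne
          rw [List.length_set] at hclen
          have hpplen : (pos - 1) / 2 < (heap.set pos (hget heap ((pos - 1) / 2))).length := by
            rw [List.length_set]; omega
          by_cases hcpos : c = pos
          · -- edge (parent pos → pos): newitem < parent
            have hppc : p = (pos - 1) / 2 := by have := child_parent hcp; omega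
            subst hppc; subst hcpos
            rw [hget_set_eq _ _ hpplen, hget_set_ne _ _ _ (by omega),
              hget_set_eq _ _ hlen]
            omega
          · by_cases hppos' : p = pos
            · -- edge (pos → child of pos): parent value now sits at pos; use hC
              subst hppos'
              rw [hget_set_ne _ _ _ (by omega), hget_set_eq _ _ hlen,
                hget_set_ne _ _ _ (by omega), hget_set_ne _ _ _ hcpos]
              exact hC hsp c hcp hclen
            · by_cases hppar : p = (pos - 1) / 2
              · -- edge (parentpos → sibling): newitem < parent ≤ sibling
                subst hppar
                have hbc := hB ((pos - 1) / 2) c hdp hcp hclen hcpos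
                rw [hget_set_ne _ _ _ (by omega), hget_set_ne _ _ _ hcpos] at hbc
                rw [hget_set_eq _ _ hpplen, hget_set_ne _ _ _ hcne,
                  hget_set_ne _ _ _ hcpos]
                omega
              · -- untouched edge
                have hbc := hB p c hdp hcp hclen hcpos
                rw [hget_set_ne _ _ _ hppos', hget_set_ne _ _ _ hcpos] at hbc
                rw [hget_set_ne _ _ _ hppar, hget_set_ne _ _ _ hppos',
                  hget_set_ne _ _ _ hcne, hget_set_ne _ _ _ hcpos]
                exact hbc
        have hC' : s < (pos - 1) / 2 → ∀ c,
            (c = 2 * ((pos - 1) / 2) + 1 ∨ c = 2 * ((pos - 1) / 2) + 2) →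
            c < (heap.set pos (hget heap ((pos - 1) / 2))).length →
            hget (heap.set pos (hget heap ((pos - 1) / 2))) (((pos - 1) / 2 - 1) / 2) ≤
            hget (heap.set pos (hget heap ((pos - 1) / 2))) c := by
          intro hspp c hcp hclen
          rw [List.length_set] at hclen
          have hdpp2 : isDesc s (((pos - 1) / 2 - 1) / 2) = true :=
            isDesc_parent_of_ne hdesc' (by omega)
          have hppchild : (pos - 1) / 2 = 2 * (((pos - 1) / 2 - 1) / 2) + 1 ∨
              (pos - 1) / 2 = 2 * (((pos - 1) / 2 - 1) / 2) + 2 := by omega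
          -- heap[pp2] ≤ heap[pp]
          have h1 := hB (((pos - 1) / 2 - 1) / 2) ((pos - 1) / 2) hdpp2 hppchild (by omega) (by omega)
          rw [hget_set_ne _ _ _ (by omega), hget_set_ne _ _ _ (by omega)] at h1
          by_cases hcpos : c = pos
          · subst hcpos
            rw [hget_set_ne _ _ _ (by omega), hget_set_eq _ _ hlen]
            exact h1
          · have h2 := hB ((pos - 1) / 2) c hdesc' hcp hclen hcpos
            rw [hget_set_ne _ _ _ (by omega), hget_set_ne _ _ _ hcpos] at h2
            rw [hget_set_ne _ _ _ (by omega), hget_set_ne _ _ _ hcpos]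
            omega
        obtain ⟨ihl, ihu, ihm, ihh⟩ :=
          ih ((pos - 1) / 2) hppos (heap.set pos (hget heap ((pos - 1) / 2))) hdesc' hplen hB' hC'
        refine ⟨by rw [ihl, List.length_set], ?_, ?_, ihh⟩
        · intro j hj
          rw [ihu j hj, hget_set_ne]
          intro hje; subst hje
          rw [hdesc] at hj; cases hj
        · rw [ihm]
          exact mset_two_sets heap pos ((pos - 1) / 2) (by omega) hlen (by omega) newitem
      · -- terminal: parent ≤ newitem; result is heap.set pos newitem
        simp only [if_neg hni]
        refine ⟨by simp, ?_, ?_, ?_⟩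
        · intro j hj
          rw [hget_set_ne]
          intro hje; subst hje; rw [hdesc] at hj; cases hj
        · trivial
        · intro p c hdp hcp hclen
          rw [List.length_set] at hclen
          by_cases hcpos : c = pos
          · have hpp : p = (pos - 1) / 2 := by
              have := child_parent hcp; omega
            subst hcpos; subst hpp
            rw [hget_set_ne _ _ _ (by omega), hget_set_eq _ _ hlen]
            omega
          · exact hB p c hdp hcp hclen hcpos
    · -- pos = s: terminal
      have hps : pos = s := by have := isDesc_le hdesc; omega
      simp only [dif_neg hsp]
      refine ⟨by simp, ?_, ?_, ?_⟩
      · intro j hj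
        rw [hget_set_ne]
        intro hje; subst hje; rw [hdesc] at hj; cases hj
      · trivial
      · intro p c hdp hcp hclen
        rw [List.length_set] at hclen
        have hcpos : c ≠ pos := by
          have := isDesc_le hdp; omega
        exact hB p c hdp hcp hclen hcpos

-- the chosen child of _siftup is one of the two children and holds the smaller value
theorem heapChild_cases (e : Nat) (heap : List Int) (p : Nat) :
    heapChild e heap p = 2 * p + 1 ∨ heapChild e heap p = 2 * p + 2 := by
  unfold heapChild; split
  · right; rfl
  · left; rfl

theorem heapChild_min (e : Nat) (heap : List Int) (p : Nat) (c : Nat)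
    (hc : c = 2 * p + 1 ∨ c = 2 * p + 2) (hce : c < e) :
    hget heap (heapChild e heap p) ≤ hget heap c := by
  unfold heapChild; split
  · rename_i hcond
    rcases hc with rfl | rfl
    · omega
    · exact le_refl _
  · rename_i hcond
    rcases hc with rfl | rfl
    · exact le_refl _
    · have : hget heap (2 * p + 1) < hget heap (2 * p + 2) := by
        by_contra hcon
        exact hcond ⟨hce, hcon⟩
      omega

-- correctness of CPython's _siftup loop, relative to the subtree rooted at the initial pos
theorem siftupLoop_spec (endpos : Nat) :
    ∀ heap pos, endpos = heap.length → pos < heap.length →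
    (∀ p c, isDesc pos p = true → (c = 2 * p + 1 ∨ c = 2 * p + 2) → c < heap.length →
        p ≠ pos → hget heap p ≤ hget heap c) →
    ((siftupLoop endpos heap pos).1.length = heap.length ∧
     isDesc pos (siftupLoop endpos heap pos).2 = true ∧
     (siftupLoop endpos heap pos).2 < heap.length ∧
     ¬ (2 * (siftupLoop endpos heap pos).2 + 1 < endpos) ∧
     (∀ j, isDesc pos j = false →
        hget (siftupLoop endpos heap pos).1 j = hget heap j) ∧
     (∀ x : Int, (((siftupLoop endpos heap pos).1.set (siftupLoop endpos heap pos).2 x :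
          List Int) : Multiset Int) = ((heap.set pos x : List Int) : Multiset Int)) ∧
     (∀ p c, isDesc pos p = true → (c = 2 * p + 1 ∨ c = 2 * p + 2) → c < heap.length →
        c ≠ (siftupLoop endpos heap pos).2 → p ≠ (siftupLoop endpos heap pos).2 →
        hget (siftupLoop endpos heap pos).1 p ≤ hget (siftupLoop endpos heap pos).1 c) ∧
     (∀ y : Int, (∀ k, isDesc pos k = true → k < heap.length → k ≠ pos → y ≤ hget heap k) →
        ∀ j, isDesc pos j = true → j < heap.length → j ≠ (siftupLoop endpos heap pos).2 →
        y ≤ hget (siftupLoop endpos heap pos).1 j)) := by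
  intro heap pos
  induction heap, pos using siftupLoop.induct endpos with
  | case1 heap pos hch ih =>
    intro hend hlen hpre
    have hcp1 : pos < heapChild endpos heap pos := heapChild_gt endpos heap pos
    have hcp2 : heapChild endpos heap pos < heap.length := by
      have := heapChild_lt endpos heap pos hch; omega
    have hcpc := heapChild_cases endpos heap pos
    have hdcp : isDesc pos (heapChild endpos heap pos) = true :=
      isDesc_child (isDesc_self pos) hcpc
    -- facts about positions in the child's subtree
    have hnotdesc_pos : isDesc (heapChild endpos heap pos) pos = false :=
      not_isDesc_of_lt hcp1
    have hsub : ∀ {j}, isDesc (heapChild endpos heap pos) j = true → isDesc pos j = true :=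
      fun hj => isDesc_trans hdcp hj
    have hsubne : ∀ {j}, isDesc (heapChild endpos heap pos) j = true → j ≠ pos := by
      intro j hj he; subst he; rw [hnotdesc_pos] at hj; cases hj
    -- precondition for the recursive call
    have hpre2 : ∀ p c, isDesc (heapChild endpos heap pos) p = true →
        (c = 2 * p + 1 ∨ c = 2 * p + 2) →
        c < (heap.set pos (hget heap (heapChild endpos heap pos))).length →
        p ≠ heapChild endpos heap pos →
        hget (heap.set pos (hget heap (heapChild endpos heap pos))) p ≤
        hget (heap.set pos (hget heap (heapChild endpos heap pos))) c := by
      intro p c hdp hcp hclen _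
      rw [List.length_set] at hclen
      have hple := isDesc_le hdp
      have hpne : p ≠ pos := by omega
      have hcne : c ≠ pos := by omega
      rw [hget_set_ne _ _ _ hpne, hget_set_ne _ _ _ hcne]
      exact hpre p c (hsub hdp) hcp hclen hpne
    obtain ⟨ihl, ihd, ihq, ihleaf, ihu, ihm, ihe, ihy⟩ :=
      ih (by rw [hend, List.length_set]) (by rw [List.length_set]; omega) hpre2
    rw [List.length_set] at ihl ihq
    -- heap is a proper heap on the child's subtree
    have hHcp : HeapAt heap (heapChild endpos heap pos) := by
      intro p c hdp hcp hclen
      exact hpre p c (hsub hdp) hcp hclen (hsubne hdp)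
    have hrootmin := subRootMin hHcp
    -- the unfolded function value
    rw [siftupLoop]
    simp only [dif_pos hch]
    refine ⟨by rw [ihl], hsub ihd, by omega, ihleaf, ?_, ?_, ?_, ?_⟩
    · -- unchanged outside sub(pos)
      intro j hj
      have hjcp : isDesc (heapChild endpos heap pos) j = false := by
        by_contra hco
        rw [Bool.not_eq_false] at hco
        rw [hsub hco] at hj; cases hj
      have hjpos : j ≠ pos := by
        intro he; subst he; rw [isDesc_self] at hj; cases hj
      rw [ihu j hjcp, hget_set_ne _ _ _ hjpos]
    · -- multiset
      intro x
      rw [ihm x]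
      exact mset_two_sets heap pos (heapChild endpos heap pos) (by omega) hlen hcp2 x
    · -- edges away from the hole
      intro p c hdp hcp hclen hcq hpq
      by_cases hppos : p = pos
      · rw [hppos]
        rw [hppos] at hcp
        have hrpos : hget (siftupLoop endpos (heap.set pos (hget heap (heapChild endpos heap pos))) (heapChild endpos heap pos)).1 pos
            = hget heap (heapChild endpos heap pos) := by
          rw [ihu pos hnotdesc_pos, hget_set_eq _ _ hlen]
        by_cases hccp : c = heapChild endpos heap pos
        · subst hccp
          rw [hrpos]
          -- use the lower-bound conclusion with y = heap[child]
          refine ihy (hget heap (heapChild endpos heap pos)) ?_ _ (isDesc_self _)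
            (by rw [List.length_set]; omega) hcq
          intro k hk hklen hkne
          rw [List.length_set] at hklen
          rw [hget_set_ne _ _ _ (hsubne hk)]
          exact hrootmin k hk hklen
        · -- sibling: untouched, and the chosen child is the smaller one
          have hcnd : isDesc (heapChild endpos heap pos) c = false := by
            by_contra hco
            rw [Bool.not_eq_false] at hco
            have hcc := isDesc_le hco
            have : c ≠ heapChild endpos heap pos := hccp
            have hpar := isDesc_parent_of_ne hco hccp
            rw [child_parent hcp] at hpar
            rw [hnotdesc_pos] at hpar; cases hpar
          rw [hrpos, ihu c hcnd, hget_set_ne _ _ _ (by omega)]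
          exact heapChild_min endpos heap pos c hcp (by omega)
      · by_cases hpcp : isDesc (heapChild endpos heap pos) p = true
        · have hccd : isDesc (heapChild endpos heap pos) c = true := by
            have hple := isDesc_le hpcp
            rw [isDesc_parent _ c (by omega), child_parent hcp]
            exact hpcp
          exact ihe p c hpcp hcp (by rw [List.length_set]; omega) hcq hpq
        · have hcnd : isDesc (heapChild endpos heap pos) c = false := by
            by_contra hco
            rw [Bool.not_eq_false] at hco
            by_cases hccp : c = heapChild endpos heap pos
            · subst hccp
              have := child_parent hcp
              have hcpp := child_parent hcpc
              exact hppos (by omega)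
            · have hpar := isDesc_parent_of_ne hco hccp
              rw [child_parent hcp] at hpar
              rw [hpar] at hpcp; exact hpcp rfl
          have hpnd : isDesc (heapChild endpos heap pos) p = false := by
            rw [Bool.not_eq_true] at hpcp; exact hpcp
          rw [ihu p hpnd, ihu c hcnd, hget_set_ne _ _ _ hppos,
            hget_set_ne _ _ _ (by intro he; subst he; exact hppos (by have := child_parent hcp; have := isDesc_le hdp; omega))]
          · exact hpre p c hdp hcp hclen hppos
    · -- lower-bound conclusion
      intro y hy j hdj hjlen hjq
      by_cases hjpos : j = pos
      · rw [hjpos, ihu _ hnotdesc_pos, hget_set_eq _ _ hlen]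
        exact hy (heapChild endpos heap pos) hdcp hcp2 (by omega)
      · by_cases hjcp : isDesc (heapChild endpos heap pos) j = true
        · refine ihy y ?_ j hjcp (by rw [List.length_set]; omega) hjq
          intro k hk hklen hkne
          rw [List.length_set] at hklen
          rw [hget_set_ne _ _ _ (hsubne hk)]
          exact hy k (hsub hk) hklen (hsubne hk)
        · rw [Bool.not_eq_true] at hjcp
          rw [ihu j hjcp, hget_set_ne _ _ _ hjpos]
          exact hy j hdj hjlen hjpos
  | case2 heap pos hch =>
    intro hend hlen hpre
    rw [siftupLoop]
    rw [dif_neg hch]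
    refine ⟨rfl, isDesc_self pos, hlen, hch, fun j _ => rfl, fun x => rfl, ?_, ?_⟩
    · intro p c hdp hcp hclen _ hpq
      exact hpre p c hdp hcp hclen hpq
    · intro y hy j hdj hjlen hjq
      exact hy j hdj hjlen hjq

-- more getD bridges
theorem hget_append_left (l : List Int) (x : Int) (j : Nat) (h : j < l.length) :
    hget (l ++ [x]) j = hget l j := by
  simp [hget, List.getD_eq_getElem?_getD, List.getElem?_append_left h]

theorem hget_append_last (l : List Int) (x : Int) :
    hget (l ++ [x]) l.length = x := by
  simp [hget, List.getD_eq_getElem?_getD]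

theorem hget_dropLast (l : List Int) (j : Nat) (h : j < l.length - 1) :
    hget l.dropLast j = hget l j := by
  have h1 : j < l.dropLast.length := by simp [List.length_dropLast]; omega
  have h2 : j < l.length := by omega
  simp [hget, List.getD_eq_getElem?_getD, List.getElem?_eq_getElem h1,
    List.getElem?_eq_getElem h2, List.getElem_dropLast]

theorem hget_last (l : List Int) (hne : l ≠ []) :
    hget l (l.length - 1) = l.getLast hne := by
  have h1 : l.length - 1 < l.length := by
    cases l with
    | nil => exact absurd rfl hne
    | cons a t => simp
  simp [hget, List.getD_eq_getElem?_getD, List.getElem?_eq_getElem h1,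
    List.getLast_eq_getElem]

theorem coe_append_singleton (l : List Int) (x : Int) :
    ((l ++ [x] : List Int) : Multiset Int) = ((l : List Int) : Multiset Int) + {x} := by
  rw [← Multiset.coe_add]; rfl

-- _siftup full correctness on the subtree rooted at pos
theorem siftup_spec (heap : List Int) (pos : Nat) (hlen : pos < heap.length)
    (hpre : ∀ p c, isDesc pos p = true → (c = 2 * p + 1 ∨ c = 2 * p + 2) → c < heap.length →
      p ≠ pos → hget heap p ≤ hget heap c) :
    ((siftup heap pos).length = heap.length ∧
     (∀ j, isDesc pos j = false → hget (siftup heap pos) j = hget heap j) ∧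
     ((siftup heap pos : List Int) : Multiset Int) = ((heap : List Int) : Multiset Int) ∧
     HeapAt (siftup heap pos) pos) := by
  obtain ⟨l1, l2, l3, l4, l5, l6, l7, l8⟩ := siftupLoop_spec heap.length heap pos rfl hlen hpre
  unfold siftup siftdown
  have hq : (siftupLoop heap.length heap pos).2 < (siftupLoop heap.length heap pos).1.length := by
    rw [l1]; exact l3
  have hsetset : ((siftupLoop heap.length heap pos).1.set (siftupLoop heap.length heap pos).2
        (hget heap pos)).set (siftupLoop heap.length heap pos).2 (hget heap pos)
      = (siftupLoop heap.length heap pos).1.set (siftupLoop heap.length heap pos).2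
        (hget heap pos) := by
    rw [List.set_set]
  have hgq : hget ((siftupLoop heap.length heap pos).1.set (siftupLoop heap.length heap pos).2
      (hget heap pos)) (siftupLoop heap.length heap pos).2 = hget heap pos :=
    hget_set_eq _ _ hq _
  rw [hgq]
  obtain ⟨d1, d2, d3, d4⟩ := siftdownLoop_spec pos (hget heap pos)
    (siftupLoop heap.length heap pos).2
    ((siftupLoop heap.length heap pos).1.set (siftupLoop heap.length heap pos).2 (hget heap pos))
    l2 (by rw [List.length_set]; exact hq)
    (by -- hB
      intro p c hdp hcp hclen hcq
      rw [List.length_set, l1] at hclen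
      rw [hsetset]
      by_cases hpq : p = (siftupLoop heap.length heap pos).2
      · -- p is the final leaf: it has no children inside the array
        exfalso
        subst hpq
        omega
      · rw [hget_set_ne _ _ _ hpq, hget_set_ne _ _ _ hcq]
        exact l7 p c hdp hcp hclen hcq hpq)
    (by -- hC: the final position is a leaf
      intro hlt c hcp hclen
      rw [List.length_set, l1] at hclen
      exfalso; omega)
  refine ⟨?_, ?_, ?_, d4⟩
  · rw [d1, List.length_set, l1]
  · intro j hj
    have hjq : j ≠ (siftupLoop heap.length heap pos).2 := by
      intro he; subst he; rw [l2] at hj; cases hj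
    rw [d2 j hj, hget_set_ne _ _ _ hjq, l5 j hj]
  · rw [d3, hsetset, l6 (hget heap pos), set_hget_self heap pos hlen]

-- heappush preserves the heap and adds the item
theorem heappush_spec (heap : List Int) (x : Int) (hH : IsHeap heap) :
    ((heappush heap x : List Int) : Multiset Int) = ((heap : List Int) : Multiset Int) + {x} ∧
    IsHeap (heappush heap x) := by
  unfold heappush siftdown
  have hgl : hget (heap ++ [x]) heap.length = x := hget_append_last heap x
  rw [hgl]
  have hset : (heap ++ [x]).set heap.length x = heap ++ [x] := by
    have := set_hget_self (heap ++ [x]) heap.length (by simp)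
    rwa [hgl] at this
  obtain ⟨d1, d2, d3, d4⟩ := siftdownLoop_spec 0 x heap.length (heap ++ [x])
    (isDesc_zero heap.length) (by simp)
    (by intro p c hdp hcp hclen hcne
        rw [List.length_append, List.length_cons, List.length_nil] at hclen
        have hclt : c < heap.length := by omega
        have hplt : p < heap.length := by omega
        rw [hset, hget_append_left _ _ _ hplt, hget_append_left _ _ _ hclt]
        exact hH p c hcp hclt)
    (by intro h0 c hcp hclen
        rw [List.length_append, List.length_cons, List.length_nil] at hclen
        exfalso; omega)
  constructor
  · rw [d3, hset, coe_append_singleton]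
  · exact (heapAt_zero_iff _).mp d4

-- heappop returns the root (the minimum) and leaves a heap
theorem heappop_spec (heap : List Int) (hne : heap ≠ []) (hH : IsHeap heap) :
    (heappop heap).1 = hget heap 0 ∧
    (((heappop heap).2 : List Int) : Multiset Int) + {hget heap 0}
        = ((heap : List Int) : Multiset Int) ∧
    IsHeap (heappop heap).2 := by
  have hlen1 : 1 ≤ heap.length := by
    cases heap with
    | nil => exact absurd rfl hne
    | cons a t => simp
  unfold heappop
  by_cases hdrop : heap.dropLast.isEmpty
  · -- singleton heap
    have hlen : heap.length = 1 := by
      have := List.isEmpty_iff.mp hdrop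
      have := congrArg List.length this
      rw [List.length_dropLast] at this
      simp at this
      omega
    obtain ⟨a, rfl⟩ := List.length_eq_one_iff.mp hlen
    simp only [if_pos hdrop]
    refine ⟨rfl, ?_, ?_⟩
    · show ((([] : List Int) : Multiset Int)) + {hget [a] 0} = (([a] : List Int) : Multiset Int)
      simp [hget]
    · show IsHeap [a].dropLast
      intro p c hcp hclen
      simp at hclen
  · simp only [if_neg hdrop]
    have hlen2 : 2 ≤ heap.length := by
      by_contra hcon
      have h1 : heap.length = 1 := by omega
      apply hdrop
      rw [List.isEmpty_iff]
      apply List.eq_nil_of_length_eq_zero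
      rw [List.length_dropLast]
      omega
    have hrlen : heap.dropLast.length = heap.length - 1 := List.length_dropLast
    have h0r : hget heap.dropLast 0 = hget heap 0 := hget_dropLast heap 0 (by omega)
    have hstart : 0 < (heap.dropLast.set 0 (hget heap (heap.length - 1))).length := by
      rw [List.length_set, hrlen]; omega
    obtain ⟨s1, s2, s3, s4⟩ := siftup_spec (heap.dropLast.set 0 (hget heap (heap.length - 1))) 0
      (by rw [List.length_set, hrlen]; omega)
      (by intro p c hdp hcp hclen hpne
          rw [List.length_set, hrlen] at hclen
          have hp1 : 1 ≤ p := by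
            have := isDesc_le hdp; omega
          rw [hget_set_ne _ _ _ (by omega), hget_set_ne _ _ _ (by omega),
            hget_dropLast _ _ (by omega), hget_dropLast _ _ (by omega)]
          exact hH p c hcp (by omega))
    refine ⟨h0r, ?_, (heapAt_zero_iff _).mp s4⟩
    · rw [s3]
      have e1 := mset_set heap.dropLast 0 (by omega) (hget heap (heap.length - 1))
      rw [h0r] at e1
      rw [e1]
      rw [hget_last heap hne, ← coe_append_singleton, List.dropLast_append_getLast hne]

-- heapify builds a heap with the same multiset
theorem heapify_fold (i : Nat) : ∀ (x : List Int), i ≤ x.length / 2 →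
    (∀ p c, (c = 2 * p + 1 ∨ c = 2 * p + 2) → c < x.length → i ≤ p → hget x p ≤ hget x c) →
    (((List.range i).reverse.foldl (fun h j => siftup h j) x).length = x.length ∧
     ((((List.range i).reverse.foldl (fun h j => siftup h j) x) : List Int) : Multiset Int)
        = ((x : List Int) : Multiset Int) ∧
     IsHeap ((List.range i).reverse.foldl (fun h j => siftup h j) x)) := by
  induction i with
  | zero =>
    intro x _ hx
    refine ⟨rfl, rfl, ?_⟩
    intro p c hcp hclen
    exact hx p c hcp hclen (Nat.zero_le p)
  | succ i ih =>
    intro x hi hx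
    rw [List.range_succ, List.reverse_append, List.reverse_singleton]
    simp only [List.singleton_append, List.foldl_cons]
    have hilen : i < x.length := by omega
    obtain ⟨s1, s2, s3, s4⟩ := siftup_spec x i hilen
      (by intro p c hdp hcp hclen hpne
          have := isDesc_le hdp
          exact hx p c hcp hclen (by omega))
    obtain ⟨f1, f2, f3⟩ := ih (siftup x i) (by omega)
      (by intro p c hcp hclen hip
          rw [s1] at hclen
          by_cases hdp : isDesc i p = true
          · have hdc : isDesc i c = true := by
              have := isDesc_le hdp
              rw [isDesc_parent _ c (by omega), child_parent hcp]
              exact hdp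
            exact s4 p c hdp hcp (by rw [s1]; exact hclen)
          · have hpne : p ≠ i := by
              intro he; subst he; exact hdp (isDesc_self p)
            have hdc : isDesc i c = false := by
              by_contra hco
              rw [Bool.not_eq_false] at hco
              by_cases hci : c = i
              · omega
              · have hpar := isDesc_parent_of_ne hco hci
                rw [child_parent hcp] at hpar
                rw [hpar] at hdp; exact hdp rfl
            rw [Bool.not_eq_true] at hdp
            rw [s2 p hdp, s2 c hdc]
            exact hx p c hcp hclen (by omega))
  -- combine
    refine ⟨by rw [f1, s1], by rw [f2, s3], f3⟩

theorem heapify_spec (x : List Int) :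
    ((heapify x).length = x.length ∧
     (((heapify x) : List Int) : Multiset Int) = ((x : List Int) : Multiset Int) ∧
     IsHeap (heapify x)) := by
  unfold heapify
  exact heapify_fold (x.length / 2) x (le_refl _)
    (by intro p c hcp hclen hp; exfalso; omega)

-- the head of a heap is min(s) for any rearrangement s
theorem min_eq_head {h s : List Int} (hH : IsHeap h) (hne : h ≠ []) (hp : h.Perm s) :
    PySem.List.min? s (fun x => x) = some (hget h 0) := by
  have hslen : s ≠ [] := by
    intro he; subst he
    exact hne (List.eq_nil_of_length_eq_zero (by simpa using hp.length_eq))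
  have h0 : 0 < h.length := by
    cases h with
    | nil => exact absurd rfl hne
    | cons a t => simp
  obtain ⟨m, hm⟩ : ∃ m, PySem.List.min? s (fun x => x) = some m := by
    cases hmin : PySem.List.min? s (fun x => x) with
    | none => exact absurd ((PySem.List.min?_eq_none_iff s (fun x => x)).mp hmin) hslen
    | some m => exact ⟨m, rfl⟩
  have hmem : m ∈ h := hp.mem_iff.mpr (PySem.List.min?_mem hm)
  have h1 : hget h 0 ≤ m := rootMin_mem hH m hmem
  have h2 : m ≤ hget h 0 := by
    have := PySem.List.min?_isMin hm (hget h 0) (hp.mem_iff.mp (hget_mem h 0 h0))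
    simpa using this
  rw [hm, le_antisymm h2 h1]

-- loop step/stop equations
theorem altLoop_stop_small (K : Int) (s : List Int) (a : Int) (h : ¬ 1 < s.length) :
    altLoop K s a = (s, a) := by
  rw [altLoop]; simp [h]

theorem altLoop_stop_ge (K : Int) (s : List Int) (a : Int) (t1 : Int) (h : 1 < s.length)
    (h1 : PySem.List.min? s (fun x => x) = some t1) (h2 : K ≤ t1) :
    altLoop K s a = (s, a) := by
  rw [altLoop]
  simp only [dif_pos h]
  split
  · rfl
  · rename_i t1' heq
    rw [h1] at heq
    injection heq with heq'
    subst heq'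
    rw [if_pos h2]

theorem altLoop_step (K : Int) (s : List Int) (a : Int) (t1 t2 : Int) (h : 1 < s.length)
    (h1 : PySem.List.min? s (fun x => x) = some t1) (h2 : ¬ K ≤ t1)
    (ht1 : t1 ∈ s)
    (h3 : PySem.List.min? (s.erase t1) (fun x => x) = some t2)
    (ht2 : t2 ∈ s.erase t1) :
    altLoop K s a = altLoop K ((s.erase t1).erase t2 ++ [t1 + t2 * 2]) (a + 1) := by
  rw [altLoop]
  simp only [dif_pos h]
  split
  · rename_i heq
    rw [h1] at heq; cases heq
  · rename_i t1' heq
    rw [h1] at heq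
    injection heq with heq'
    subst heq'
    rw [if_neg h2]
    simp only [PySem.List.remove?_eq_some_erase s t1 ht1, Option.getD_some]
    split
    · rename_i heq2
      rw [PySem.List.remove?_eq_some_erase s t1 ht1, Option.getD_some, h3] at heq2
      cases heq2
    · rename_i t2' heq2
      rw [PySem.List.remove?_eq_some_erase s t1 ht1, Option.getD_some, h3] at heq2
      injection heq2 with heq2'
      subst heq2'
      rw [PySem.List.remove?_eq_some_erase (s.erase t1) t2 ht2, Option.getD_some]

theorem solLoop_stop_small (K : Int) (heap : List Int) (a : Int) (h : ¬ 1 < heap.length) :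
    solLoop K heap a = (heap, a) := by
  rw [solLoop]; simp [h]

theorem solLoop_stop_ge (K : Int) (heap : List Int) (a : Int) (h : 1 < heap.length)
    (h2 : ¬ hget heap 0 < K) :
    solLoop K heap a = (heap, a) := by
  rw [solLoop]; simp [h, h2]

theorem solLoop_step (K : Int) (heap : List Int) (a : Int) (h : 1 < heap.length)
    (h2 : hget heap 0 < K) :
    solLoop K heap a = solLoop K
      (heappush (heappop (heappop heap).2).2 ((heappop heap).1 + (heappop (heappop heap).2).1 * 2))
      (a + 1) := by
  rw [solLoop]
  simp [h, h2]

-- nonemptiness helpers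
theorem ne_nil_of_length_pos' {l : List Int} (h : 0 < l.length) : l ≠ [] := by
  intro he; subst he; simp at h

-- the bisimulation: A's heap loop and B's scan loop agree
theorem loop_bisim (K : Int) : ∀ (n : Nat) (hA sB : List Int) (a : Int),
    hA.length = n → IsHeap hA → hA ≠ [] → hA.Perm sB →
    ((solLoop K hA a).2 = (altLoop K sB a).2 ∧
     IsHeap (solLoop K hA a).1 ∧ (solLoop K hA a).1 ≠ [] ∧
     (solLoop K hA a).1.Perm (altLoop K sB a).1) := by
  intro n
  induction n using Nat.strong_induction_on with
  | _ n ih =>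
    intro hA sB a hlen hH hne hp
    by_cases hbig : 1 < hA.length
    · have hminB := min_eq_head hH hne hp
      by_cases hlt : hget hA 0 < K
      · -- one merge step on both sides
        have hpop1 := heappop_spec hA hne hH
        have hlen1 : (heappop hA).2.length = hA.length - 1 := len_heappop hA
        have hne1 : (heappop hA).2 ≠ [] := ne_nil_of_length_pos' (by omega)
        have ht1s : hget hA 0 ∈ sB := hp.mem_iff.mp (hget_mem hA 0 (by omega))
        -- h1 ~ sB.erase t1
        have hperm1 : (heappop hA).2.Perm (sB.erase (hget hA 0)) := by
          rw [← Multiset.coe_eq_coe]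
          have e1 := mset_erase sB (hget hA 0) ht1s
          have e2 := hpop1.2.1
          have e3 : ((hA : List Int) : Multiset Int) = ((sB : List Int) : Multiset Int) :=
            Multiset.coe_eq_coe.mpr hp
          rw [e3, ← e1] at e2
          exact add_right_cancel e2
        have hminB2 := min_eq_head hpop1.2.2 hne1 hperm1
        have hpop2 := heappop_spec (heappop hA).2 hne1 hpop1.2.2
        have hlen2 : (heappop (heappop hA).2).2.length = hA.length - 2 := by
          have := len_heappop (heappop hA).2; omega
        have ht2s : hget (heappop hA).2 0 ∈ sB.erase (hget hA 0) :=
          hperm1.mem_iff.mp (hget_mem _ 0 (by omega))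
        have hperm2 : (heappop (heappop hA).2).2.Perm
            ((sB.erase (hget hA 0)).erase (hget (heappop hA).2 0)) := by
          rw [← Multiset.coe_eq_coe]
          have e1 := mset_erase (sB.erase (hget hA 0)) (hget (heappop hA).2 0) ht2s
          have e2 := hpop2.2.1
          have e3 := Multiset.coe_eq_coe.mpr hperm1
          rw [e3, ← e1] at e2
          exact add_right_cancel e2
        -- the pushed values agree
        have hpush := heappush_spec (heappop (heappop hA).2).2
          ((heappop hA).1 + (heappop (heappop hA).2).1 * 2) hpop2.2.2
        have hpermP : (heappush (heappop (heappop hA).2).2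
              ((heappop hA).1 + (heappop (heappop hA).2).1 * 2)).Perm
            (((sB.erase (hget hA 0)).erase (hget (heappop hA).2 0))
              ++ [hget hA 0 + hget (heappop hA).2 0 * 2]) := by
          rw [← Multiset.coe_eq_coe, hpush.1, coe_append_singleton,
            Multiset.coe_eq_coe.mpr hperm2, hpop1.1, hpop2.1]
        have hlenP : (heappush (heappop (heappop hA).2).2
            ((heappop hA).1 + (heappop (heappop hA).2).1 * 2)).length = hA.length - 1 := by
          rw [len_heappush]; omega
        have hneP := ne_nil_of_length_pos' (l := heappush (heappop (heappop hA).2).2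
            ((heappop hA).1 + (heappop (heappop hA).2).1 * 2)) (by omega)
        -- rewrite both loops one step
        rw [solLoop_step K hA a hbig hlt,
          altLoop_step K sB a (hget hA 0) (hget (heappop hA).2 0)
            (by rw [← hp.length_eq]; exact hbig) hminB (by omega) ht1s hminB2 ht2s]
        exact ih (hA.length - 1) (by omega) _ _ (a + 1) hlenP hpush.2 hneP hpermP
      · -- A breaks on the heap head; B breaks on the same minimum
        rw [solLoop_stop_ge K hA a hbig hlt,
          altLoop_stop_ge K sB a (hget hA 0) (by rw [← hp.length_eq]; exact hbig) hminB (by omega)]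
        exact ⟨rfl, hH, hne, hp⟩
    · rw [solLoop_stop_small K hA a hbig,
        altLoop_stop_small K sB a (by rw [← hp.length_eq]; exact hbig)]
      exact ⟨rfl, hH, hne, hp⟩

-- ===== VERDICT (by name: the statement is the Claim_ definition above) =====
theorem solution_spec : Claim_equal_solution := by
  unfold Claim_equal_solution Spec_solution Pre_solution
  intro scoville K _ hne
  unfold solution solution_alt
  obtain ⟨hlen, hmset, hheap⟩ := heapify_spec scoville
  have hperm : (heapify scoville).Perm scoville := Multiset.coe_eq_coe.mp hmset
  have hneh : heapify scoville ≠ [] := by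
    intro he
    rw [he] at hperm
    exact hne (hperm.symm.eq_nil)
  obtain ⟨e1, e2, e3, e4⟩ :=
    loop_bisim K (heapify scoville).length (heapify scoville) scoville 0 rfl hheap hneh hperm
  have hminB := min_eq_head e2 e3 e4
  rw [← e1, hminB]
  by_cases hlt : hget (solLoop K (heapify scoville) 0).1 0 < K
  · rw [if_pos hlt]
    have hKm : ¬ K ≤ hget (solLoop K (heapify scoville) 0).1 0 := by omega
    by_cases hz : (solLoop K (heapify scoville) 0).2 = 0 <;> simp [hz, hKm]
  · rw [if_neg hlt]
    have hK : K ≤ hget (solLoop K (heapify scoville) 0).1 0 := by omega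
    by_cases hz : (solLoop K (heapify scoville) 0).2 = 0 <;> simp [hz, hK]
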